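-- pv_equiv track=rewrite | github.com/tianyilt/qzcli_tool | qzcli/cli.py | _resolve_workspace_option_from_snapshot
-- ===== SOURCE A (Python) =====
-- from typing import Any, Dict, List, Optional, Sequence, Tuple
--
-- def _resolve_workspace_option_from_snapshot(
--     workspace_options: List[Dict[str, Any]],
--     workspace_value: str,
-- ) -> Tuple[Optional[str], str]:
--     """仅基于已预加载的 workspace 快照解析名称或 ID。"""
--     if not workspace_value:
--         return None, ""
--
--     for option in workspace_options:
--         option_id = str(option.get("id", "") or "")
--         option_name = str(option.get("name", "") or option_id)
--         if not option_id:
--             continue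
--         if workspace_value == option_id:
--             return option_id, option_name or option_id
--
--     lowered = workspace_value.lower()
--     exact_match: Optional[Dict[str, Any]] = None
--     fuzzy_matches: List[Dict[str, Any]] = []
--     for option in workspace_options:
--         option_id = str(option.get("id", "") or "")
--         option_name = str(option.get("name", "") or option_id)
--         if not option_id:
--             continue
--         if option_name == workspace_value:
--             exact_match = option
--             break
--         if option_name and lowered in option_name.lower():
--             fuzzy_matches.append(option)
--
--     matched = exact_match or (fuzzy_matches[0] if len(fuzzy_matches) == 1 else None)
--     if not matched:
--         return None, ""
--     matched_id = str(matched.get("id", "") or "")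
--     matched_name = str(matched.get("name", "") or matched_id)
--     return matched_id or None, matched_name
-- ===== SOURCE B (Python) =====
-- from typing import Any, Dict, List, Optional, Tuple
--
-- def _resolve_workspace_option_from_snapshot(
--     workspace_options: List[Dict[str, Any]],
--     workspace_value: str,
-- ) -> Tuple[Optional[str], str]:
--     """Single pass: collect first id match, first exact name match and all fuzzy matches."""
--     if not workspace_value:
--         return None, ""
--
--     lowered = workspace_value.lower()
--     id_match: Optional[Tuple[str, str]] = None
--     name_match: Optional[Tuple[str, str]] = None
--     fuzzy_matches: List[Tuple[str, str]] = []
--     for option in workspace_options: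
--         option_id = str(option.get("id", "") or "")
--         if not option_id:
--             continue
--         option_name = str(option.get("name", "") or option_id)
--         if id_match is None and workspace_value == option_id:
--             id_match = (option_id, option_name)
--         if name_match is None and option_name == workspace_value:
--             name_match = (option_id, option_name)
--         if option_name and lowered in option_name.lower():
--             fuzzy_matches.append((option_id, option_name))
--
--     if id_match is not None:
--         matched_id, matched_name = id_match
--         return matched_id, matched_name or matched_id
--     matched = name_match or (fuzzy_matches[0] if len(fuzzy_matches) == 1 else None)
--     if matched is None:
--         return None, ""
--     matched_id, matched_name = matched
--     return matched_id or None, matched_name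
-- ===== Notes on version B (the rewrite author's own statement) =====
-- stated objective: simpler
-- what changed: Replaced A's early-return id-scan plus a second break-on-exact scan by one single pass that records the first id match, the first exact name match and all fuzzy matches, resolving priorities after the loop.
import Mathlib
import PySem

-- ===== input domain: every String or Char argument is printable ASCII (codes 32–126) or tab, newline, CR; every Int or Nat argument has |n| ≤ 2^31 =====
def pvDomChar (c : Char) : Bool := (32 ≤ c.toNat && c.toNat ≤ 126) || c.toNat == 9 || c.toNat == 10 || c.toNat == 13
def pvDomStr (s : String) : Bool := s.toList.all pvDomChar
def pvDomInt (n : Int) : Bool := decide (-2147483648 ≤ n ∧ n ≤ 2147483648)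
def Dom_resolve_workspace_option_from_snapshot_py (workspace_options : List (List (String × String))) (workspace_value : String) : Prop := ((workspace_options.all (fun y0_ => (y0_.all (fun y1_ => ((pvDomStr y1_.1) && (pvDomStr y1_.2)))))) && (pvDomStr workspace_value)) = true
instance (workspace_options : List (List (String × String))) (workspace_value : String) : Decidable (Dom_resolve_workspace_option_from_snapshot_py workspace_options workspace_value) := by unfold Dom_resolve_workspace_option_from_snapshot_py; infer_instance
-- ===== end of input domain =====

-- B replaces A's early-return id scan plus a second break-on-exact scan by ONE pass that
-- records first id match, first exact name match and all fuzzy matches, resolving after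
-- the loop (objective: simpler decomposition; return values proved identical).

-- ===== PORT A =====
-- shared accessors: both Pythons compute option_id / option_name by the identical
-- expressions `str(option.get(k, "") or "")` (values are strings, so str(..) is identity)
def pvPyOr (x y : String) : String := if x = "" then y else x
def pvOptId (o : List (String × String)) : String :=
  pvPyOr ((PySem.Dict.mk o).getD "id" "") ""
def pvOptName (o : List (String × String)) : String :=
  pvPyOr ((PySem.Dict.mk o).getD "name" "") (pvOptId o)

-- A's first loop: early return on an id match
def aLoop1 (v : String) : List (List (String × String)) → Option (String × String)
  | [] => none
  | o :: rest =>
    if pvOptId o = "" then aLoop1 v rest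
    else if v = pvOptId o then some (pvOptId o, pvPyOr (pvOptName o) (pvOptId o))
    else aLoop1 v rest

-- A's second loop: (exact_match, fuzzy_matches) with break on the exact match
def aLoop2 (v lowered : String) : List (List (String × String)) →
    Option (List (String × String)) × List (List (String × String))
  | [] => (none, [])
  | o :: rest =>
    if pvOptId o = "" then aLoop2 v lowered rest
    else if pvOptName o = v then (some o, [])
    else if pvOptName o ≠ "" ∧ PySem.Str.isIn lowered (PySem.Str.lower (pvOptName o)) = true then
      let r := aLoop2 v lowered rest
      (r.1, o :: r.2)
    else aLoop2 v lowered rest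

def resolve_workspace_option_from_snapshot_py (workspace_options : List (List (String × String))) (workspace_value : String) : Option String × String :=
  if workspace_value = "" then (none, "")
  else
    match aLoop1 workspace_value workspace_options with
    | some (i, n) => (some i, n)
    | none =>
      let lowered := PySem.Str.lower workspace_value
      let r := aLoop2 workspace_value lowered workspace_options
      let matched := r.1.orElse (fun _ => if r.2.length = 1 then r.2.head? else none)
      match matched with
      | none => (none, "")
      | some m =>
        (if pvOptId m = "" then none else some (pvOptId m), pvOptName m)

-- ===== PORT B =====
-- one loop body over the state (id_match, name_match, fuzzy_matches)
def bStep (v lowered : String)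
    (s : Option (String × String) × Option (String × String) × List (String × String))
    (o : List (String × String)) :
    Option (String × String) × Option (String × String) × List (String × String) :=
  if pvOptId o = "" then s
  else
    ( (if s.1.isNone ∧ v = pvOptId o then some (pvOptId o, pvOptName o) else s.1),
      (if s.2.1.isNone ∧ pvOptName o = v then some (pvOptId o, pvOptName o) else s.2.1),
      (if pvOptName o ≠ "" ∧ PySem.Str.isIn lowered (PySem.Str.lower (pvOptName o)) = true
        then s.2.2 ++ [(pvOptId o, pvOptName o)] else s.2.2) )

def resolve_workspace_option_from_snapshot_py_alt (workspace_options : List (List (String × String))) (workspace_value : String) : Option String × String :=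
  if workspace_value = "" then (none, "")
  else
    let lowered := PySem.Str.lower workspace_value
    let s := workspace_options.foldl (bStep workspace_value lowered) (none, none, [])
    match s.1 with
    | some (i, n) => (some i, if n = "" then i else n)
    | none =>
      match s.2.1.orElse (fun _ => if s.2.2.length = 1 then s.2.2.head? else none) with
      | none => (none, "")
      | some (i, n) => (if i = "" then none else some i, n)

-- ===== PRECONDITION & SPEC =====
def Spec_resolve_workspace_option_from_snapshot_py (workspace_options : List (List (String × String))) (workspace_value : String) (out : Option String × String) : Prop := out = resolve_workspace_option_from_snapshot_py_alt workspace_options workspace_value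
instance (workspace_options : List (List (String × String))) (workspace_value : String) (out : Option String × String) : Decidable (Spec_resolve_workspace_option_from_snapshot_py workspace_options workspace_value out) := by unfold Spec_resolve_workspace_option_from_snapshot_py; infer_instance

-- ===== CLAIM (what is proved, stated in full; the proofs are below) =====
def Claim_equal_resolve_workspace_option_from_snapshot_py : Prop := ∀ (workspace_options : List (List (String × String))) (workspace_value : String), Dom_resolve_workspace_option_from_snapshot_py workspace_options workspace_value → Spec_resolve_workspace_option_from_snapshot_py workspace_options workspace_value (resolve_workspace_option_from_snapshot_py workspace_options workspace_value)

-- ===== LEMMAS AND PROOFS =====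
-- the three components of B's single-pass state, as independent folds
def stepI (v : String) (i : Option (String × String)) (o : List (String × String)) : Option (String × String) :=
  if pvOptId o = "" then i
  else if i.isNone ∧ v = pvOptId o then some (pvOptId o, pvOptName o) else i

def stepN (v : String) (n : Option (String × String)) (o : List (String × String)) : Option (String × String) :=
  if pvOptId o = "" then n
  else if n.isNone ∧ pvOptName o = v then some (pvOptId o, pvOptName o) else n

def stepF (lowered : String) (f : List (String × String)) (o : List (String × String)) : List (String × String) :=
  if pvOptId o = "" then f
  else if pvOptName o ≠ "" ∧ PySem.Str.isIn lowered (PySem.Str.lower (pvOptName o)) = true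
    then f ++ [(pvOptId o, pvOptName o)] else f

def pvPair (o : List (String × String)) : String × String := (pvOptId o, pvOptName o)

-- equation lemmas for aLoop2, one per branch (kept as rw-targets so that the
-- isIn-condition is never rewritten by simp's bridge lemmas)
theorem aLoop2_cons_skip (v lowered : String) (o : List (String × String)) (rest : List (List (String × String)))
    (h0 : pvOptId o = "") : aLoop2 v lowered (o :: rest) = aLoop2 v lowered rest := by
  simp only [aLoop2]; rw [if_pos h0]

theorem aLoop2_cons_exact (v lowered : String) (o : List (String × String)) (rest : List (List (String × String)))
    (h0 : ¬ pvOptId o = "") (h1 : pvOptName o = v) :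
    aLoop2 v lowered (o :: rest) = (some o, []) := by
  simp only [aLoop2]; rw [if_neg h0, if_pos h1]

theorem aLoop2_cons_fuzzy (v lowered : String) (o : List (String × String)) (rest : List (List (String × String)))
    (h0 : ¬ pvOptId o = "") (h1 : ¬ pvOptName o = v)
    (h2 : pvOptName o ≠ "" ∧ PySem.Str.isIn lowered (PySem.Str.lower (pvOptName o)) = true) :
    aLoop2 v lowered (o :: rest) = ((aLoop2 v lowered rest).1, o :: (aLoop2 v lowered rest).2) := by
  simp only [aLoop2]; rw [if_neg h0, if_neg h1, if_pos h2]

theorem aLoop2_cons_other (v lowered : String) (o : List (String × String)) (rest : List (List (String × String)))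
    (h0 : ¬ pvOptId o = "") (h1 : ¬ pvOptName o = v)
    (h2 : ¬ (pvOptName o ≠ "" ∧ PySem.Str.isIn lowered (PySem.Str.lower (pvOptName o)) = true)) :
    aLoop2 v lowered (o :: rest) = aLoop2 v lowered rest := by
  simp only [aLoop2]; rw [if_neg h0, if_neg h1, if_neg h2]

-- equation lemmas for stepF
theorem stepF_skip (lowered : String) (f : List (String × String)) (o : List (String × String))
    (h0 : pvOptId o = "") : stepF lowered f o = f := by
  simp only [stepF]; rw [if_pos h0]

theorem stepF_hit (lowered : String) (f : List (String × String)) (o : List (String × String))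
    (h0 : ¬ pvOptId o = "")
    (h2 : pvOptName o ≠ "" ∧ PySem.Str.isIn lowered (PySem.Str.lower (pvOptName o)) = true) :
    stepF lowered f o = f ++ [pvPair o] := by
  simp only [stepF]; rw [if_neg h0, if_pos h2]; rfl

theorem stepF_miss (lowered : String) (f : List (String × String)) (o : List (String × String))
    (h0 : ¬ pvOptId o = "")
    (h2 : ¬ (pvOptName o ≠ "" ∧ PySem.Str.isIn lowered (PySem.Str.lower (pvOptName o)) = true)) :
    stepF lowered f o = f := by
  simp only [stepF]; rw [if_neg h0, if_neg h2]

theorem foldl_bStep_split (v lowered : String) (l : List (List (String × String)))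
    (i n : Option (String × String)) (f : List (String × String)) :
    l.foldl (bStep v lowered) (i, n, f) =
      (l.foldl (stepI v) i, l.foldl (stepN v) n, l.foldl (stepF lowered) f) := by
  induction l generalizing i n f with
  | nil => rfl
  | cons o rest ih =>
    simp only [List.foldl_cons]
    rw [show bStep v lowered (i, n, f) o = (stepI v i o, stepN v n o, stepF lowered f o) from by
      simp only [bStep, stepI, stepN, stepF]; split_ifs <;> rfl]
    exact ih _ _ _

theorem foldl_stepI_some (v : String) (l : List (List (String × String))) (p : String × String) :
    l.foldl (stepI v) (some p) = some p := by
  induction l with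
  | nil => rfl
  | cons o rest ih => simpa [stepI] using ih

theorem foldl_stepN_some (v : String) (l : List (List (String × String))) (p : String × String) :
    l.foldl (stepN v) (some p) = some p := by
  induction l with
  | nil => rfl
  | cons o rest ih => simpa [stepN] using ih

theorem aLoop1_eq (v : String) (l : List (List (String × String))) :
    aLoop1 v l = (l.foldl (stepI v) none).map (fun p => (p.1, pvPyOr p.2 p.1)) := by
  induction l with
  | nil => rfl
  | cons o rest ih =>
    by_cases h0 : pvOptId o = ""
    · simpa [aLoop1, stepI, h0] using ih
    · by_cases h1 : v = pvOptId o
      · simp [aLoop1, stepI, h0, h1, foldl_stepI_some]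
      · simpa [aLoop1, stepI, h0, h1] using ih

theorem foldl_stepN_eq (v lowered : String) (l : List (List (String × String))) :
    l.foldl (stepN v) none = ((aLoop2 v lowered l).1).map pvPair := by
  induction l with
  | nil => rfl
  | cons o rest ih =>
    rw [List.foldl_cons]
    by_cases h0 : pvOptId o = ""
    · rw [aLoop2_cons_skip v lowered o rest h0,
        show stepN v none o = none from by simp [stepN, h0]]
      exact ih
    · by_cases h1 : pvOptName o = v
      · rw [aLoop2_cons_exact v lowered o rest h0 h1,
          show stepN v none o = some (pvPair o) from by simp [stepN, h0, h1, pvPair]]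
        simp [foldl_stepN_some]
      · have hstep : stepN v none o = none := by simp [stepN, h0, h1]
        by_cases h2 : pvOptName o ≠ "" ∧ PySem.Str.isIn lowered (PySem.Str.lower (pvOptName o)) = true
        · rw [aLoop2_cons_fuzzy v lowered o rest h0 h1 h2, hstep]; exact ih
        · rw [aLoop2_cons_other v lowered o rest h0 h1 h2, hstep]; exact ih

theorem foldl_stepF_append (lowered : String) (l : List (List (String × String)))
    (f : List (String × String)) :
    l.foldl (stepF lowered) f = f ++ l.foldl (stepF lowered) [] := by
  induction l generalizing f with
  | nil => simp
  | cons o rest ih =>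
    simp only [List.foldl_cons]
    rw [ih (stepF lowered f o), ih (stepF lowered [] o)]
    have hsf : stepF lowered f o = f ++ stepF lowered [] o := by
      by_cases h0 : pvOptId o = ""
      · rw [stepF_skip lowered f o h0, stepF_skip lowered [] o h0]; simp
      · by_cases h2 : pvOptName o ≠ "" ∧ PySem.Str.isIn lowered (PySem.Str.lower (pvOptName o)) = true
        · rw [stepF_hit lowered f o h0 h2, stepF_hit lowered [] o h0 h2]; simp
        · rw [stepF_miss lowered f o h0 h2, stepF_miss lowered [] o h0 h2]; simp
    rw [hsf, List.append_assoc]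

theorem foldl_stepF_eq (v lowered : String) (l : List (List (String × String)))
    (h : (aLoop2 v lowered l).1 = none) :
    l.foldl (stepF lowered) [] = ((aLoop2 v lowered l).2).map pvPair := by
  induction l with
  | nil => rfl
  | cons o rest ih =>
    rw [List.foldl_cons]
    by_cases h0 : pvOptId o = ""
    · rw [aLoop2_cons_skip v lowered o rest h0] at h ⊢
      rw [stepF_skip lowered [] o h0]; exact ih h
    · by_cases h1 : pvOptName o = v
      · rw [aLoop2_cons_exact v lowered o rest h0 h1] at h; exact absurd h (by simp)
      · by_cases h2 : pvOptName o ≠ "" ∧ PySem.Str.isIn lowered (PySem.Str.lower (pvOptName o)) = true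
        · rw [aLoop2_cons_fuzzy v lowered o rest h0 h1 h2] at h ⊢
          rw [stepF_hit lowered [] o h0 h2, foldl_stepF_append]
          simp only at h
          rw [ih h]; simp
        · rw [aLoop2_cons_other v lowered o rest h0 h1 h2] at h ⊢
          rw [stepF_miss lowered [] o h0 h2]; exact ih h

-- ===== VERDICT (by name: the statement is the Claim_ definition above) =====
theorem resolve_workspace_option_from_snapshot_py_spec : Claim_equal_resolve_workspace_option_from_snapshot_py := by
  intro l v _hDom
  unfold Spec_resolve_workspace_option_from_snapshot_py
  unfold resolve_workspace_option_from_snapshot_py resolve_workspace_option_from_snapshot_py_alt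
  by_cases hv : v = ""
  · simp [hv]
  · rw [if_neg hv, if_neg hv]
    rcases hL1 : aLoop1 v l with _ | ⟨i, n⟩
    · -- no id match
      have hI : l.foldl (stepI v) none = none :=
        Option.map_eq_none_iff.mp ((aLoop1_eq v l).symm.trans hL1)
      rcases hE : (aLoop2 v (PySem.Str.lower v) l).1 with _ | m
      · -- no exact name match: fuzzy lists of the two sides correspond elementwise
        rcases hF : (aLoop2 v (PySem.Str.lower v) l).2 with _ | ⟨m0, fr⟩
        · simp [foldl_bStep_split, hI, foldl_stepN_eq v (PySem.Str.lower v) l,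
            foldl_stepF_eq v (PySem.Str.lower v) l hE, hE, hF, Option.orElse]
        · rcases fr with _ | ⟨m1, fr'⟩ <;>
            simp [foldl_bStep_split, hI, foldl_stepN_eq v (PySem.Str.lower v) l,
              foldl_stepF_eq v (PySem.Str.lower v) l hE, hE, hF, Option.orElse, pvPair]
      · -- exact name match m on both sides
        simp [foldl_bStep_split, hI, foldl_stepN_eq v (PySem.Str.lower v) l, hE,
          Option.orElse, pvPair]
    · -- id match: A returned (i, n) from its first loop
      have h := (aLoop1_eq v l).symm.trans hL1
      rcases hq : l.foldl (stepI v) none with _ | q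
      · rw [hq] at h; simp at h
      · rw [hq] at h
        simp only [Option.map_some, Option.some.injEq, Prod.mk.injEq] at h
        obtain ⟨hi, hn⟩ := h
        subst hi; subst hn
        simp [foldl_bStep_split, hq, pvPyOr]
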